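-- pv_equiv track=rewrite | github.com/amaurylopezmedina/Invoix | glib/uGlobalLib.py | obtener_valor_connstring
-- ===== SOURCE A (Python) =====
-- def obtener_valor_connstring(Ustring: str, clave: str) -> str:
--     """
--     Extrae el valor de una clave dentro de un connection string separado por ';'.
--
--     Args:
--         conn_string (str): Cadena de conexión completa.
--         clave (str): Nombre de la clave a buscar (ej: SERVER, DATABASE, UID, PWD).
--
--     Returns:
--         str: Valor asociado a la clave o None si no existe.
--     """
--     partes = Ustring.split(";")
--     clave = clave.upper().strip()
--
--     for parte in partes:
--         if "=" in parte:
--             k, v = parte.split("=", 1)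
--             if k.strip().upper() == clave:
--                 return v.strip()
--
--     return None
-- ===== SOURCE B (Python) =====
-- def obtener_valor_connstring(Ustring: str, clave: str) -> str:
--     # Parse the whole connection string into a dict (first occurrence of a
--     # duplicated key wins, via setdefault), then do a single lookup.
--     valores = {}
--     for parte in Ustring.split(";"):
--         if "=" in parte:
--             k, v = parte.split("=", 1)
--             valores.setdefault(k.strip().upper(), v.strip())
--     return valores.get(clave.upper().strip())
-- ===== Notes on version B (the rewrite author's own statement) =====
-- stated objective: idiomatic
-- what changed: A's early-returning linear scan is replaced by parsing the whole string once into a dict (setdefault so the first occurrence of a duplicate key wins) followed by a single lookup.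
import Mathlib
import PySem

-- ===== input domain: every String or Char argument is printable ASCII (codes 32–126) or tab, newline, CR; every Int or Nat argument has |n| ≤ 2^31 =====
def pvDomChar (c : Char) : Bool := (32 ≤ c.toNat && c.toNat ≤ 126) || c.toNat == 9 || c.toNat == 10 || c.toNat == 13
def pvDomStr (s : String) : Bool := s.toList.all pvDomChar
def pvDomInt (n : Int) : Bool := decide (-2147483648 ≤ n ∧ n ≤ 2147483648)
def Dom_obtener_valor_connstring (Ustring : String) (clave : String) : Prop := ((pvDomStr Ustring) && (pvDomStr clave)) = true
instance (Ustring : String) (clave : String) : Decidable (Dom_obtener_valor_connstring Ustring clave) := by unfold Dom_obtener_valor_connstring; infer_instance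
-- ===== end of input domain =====

-- B parses the whole connection string into a dict (first occurrence of a duplicate key wins) and does one lookup, instead of A's early-returning scan.


-- shared fragment of both Pythons: `if "=" in parte: k, v = parte.split("=", 1)`
-- (the fallback `none` of the inner match is unreachable: split("=",1) gives two pieces when "=" is present)
def pvKV (parte : String) : Option (String × String) :=
  if PySem.Str.isIn "=" parte then
    match PySem.Str.splitMax? parte "=" 1 with
    | some [k, v] => some (k, v)
    | _ => none
  else none

-- ===== PORT A =====
-- the for-loop with early return
def pvGoA (clave : String) : List String → Option String
  | [] => none
  | parte :: rest =>
    match pvKV parte with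
    | some (k, v) =>
        if PySem.Str.upper (PySem.Str.strip k) == clave then some (PySem.Str.strip v)
        else pvGoA clave rest
    | none => pvGoA clave rest

def obtener_valor_connstring (Ustring : String) (clave : String) : Option String :=
  pvGoA (PySem.Str.strip (PySem.Str.upper clave)) ((PySem.Str.split? Ustring ";").getD [])

-- ===== PORT B =====
-- one step of the dict-building loop: valores.setdefault(k.strip().upper(), v.strip())
def pvStep (d : PySem.Dict String String) (parte : String) : PySem.Dict String String :=
  match pvKV parte with
  | some (k, v) => d.setdefault (PySem.Str.upper (PySem.Str.strip k)) (PySem.Str.strip v)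
  | none => d

def obtener_valor_connstring_alt (Ustring : String) (clave : String) : Option String :=
  (((PySem.Str.split? Ustring ";").getD []).foldl pvStep PySem.Dict.empty).get?
    (PySem.Str.strip (PySem.Str.upper clave))

-- ===== PRECONDITION & SPEC =====
def Spec_obtener_valor_connstring (Ustring : String) (clave : String) (out : Option String) : Prop := out = obtener_valor_connstring_alt Ustring clave
instance (Ustring : String) (clave : String) (out : Option String) : Decidable (Spec_obtener_valor_connstring Ustring clave out) := by unfold Spec_obtener_valor_connstring; infer_instance

-- ===== CLAIM (what is proved, stated in full; the proofs are below) =====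
def Claim_equal_obtener_valor_connstring : Prop := ∀ (Ustring : String) (clave : String), Dom_obtener_valor_connstring Ustring clave → Spec_obtener_valor_connstring Ustring clave (obtener_valor_connstring Ustring clave)

-- ===== LEMMAS AND PROOFS =====

/-- Looking up `c` after folding the dict-building step over `parts` starting from `d`
is: whatever `d` already has at `c`, else the early-return scan's answer on `parts`. -/
theorem pvFoldl_get (c : String) (parts : List String) :
    ∀ d : PySem.Dict String String,
      (parts.foldl pvStep d).get? c = (d.get? c).or (pvGoA c parts) := by
  induction parts with
  | nil => intro d; simp [pvGoA]
  | cons parte rest ih =>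
    intro d
    rw [List.foldl_cons, ih]
    cases hkv : pvKV parte with
    | none => simp [pvStep, pvGoA, hkv]
    | some kv =>
      obtain ⟨k, v⟩ := kv
      simp only [pvStep, pvGoA, hkv]
      by_cases hc : c = PySem.Str.upper (PySem.Str.strip k)
      · rw [hc, PySem.Dict.get?_setdefault_self]
        cases d.get? (PySem.Str.upper (PySem.Str.strip k)) <;> simp
      · rw [PySem.Dict.get?_setdefault_of_ne _ _ hc]
        have : (PySem.Str.upper (PySem.Str.strip k) == c) = false := by
          simp; exact fun h => hc h.symm
        rw [this]
        simp

-- ===== VERDICT (by name: the statement is the Claim_ definition above) =====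
theorem obtener_valor_connstring_spec : Claim_equal_obtener_valor_connstring := by
  intro Ustring clave _
  show obtener_valor_connstring Ustring clave = obtener_valor_connstring_alt Ustring clave
  rw [obtener_valor_connstring, obtener_valor_connstring_alt, pvFoldl_get]
  simp
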